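-- pv_equiv track=rewrite | github.com/Algorithm-Passport/AlgorithmStudy | src/sooho-Kang/4주차/1213.py | solution
-- ===== SOURCE A (Python) =====
-- from collections import Counter, deque
--
-- def solution(strs):
--     # 모두 덱 자료구조로 만듬
--     front = deque([])
--     back = deque([])
--     arr = deque([])
--     center = ""
--     # strs 배열화, 정렬
--     for i in sorted(strs):
--         arr.append(i)
--     # 갯수를 센 배열
--     counted = Counter(arr)
--
--     # 검사 개수가 홀수인 문자가 하나 이하여야됨
--     WFLAG = 0
--     for i in set(arr):
--         if counted[i] % 2 != 0:
--             WFLAG += 1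
--             center = i
--             # center값 하나 제거 나중에 이어붙이기 위함
--             arr.remove(center)
--             if WFLAG == 2:
--                 return "I'm Sorry Hansoo"
--     # 메인로직
--     for i in sorted(set(arr)):
--         #모든 문자 카운트는 짝수임 이걸 반짤라서 앞에 붙이고 뒤에 붙임
--         for _ in range(counted[i] // 2):
--             front.append(arr.popleft())
--             back.appendleft(arr.popleft())
--     #최종값 반환
--     front.append(center)
--     return "".join(front + back)
-- ===== SOURCE B (Python) =====
-- from collections import Counter
--
--
-- def solution(strs):
--     cnt = Counter(strs)
--     odds = [s for s in cnt if cnt[s] % 2 != 0]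
--     if len(odds) >= 2:
--         return "I'm Sorry Hansoo"
--     center = odds[0] if odds else ""
--     half = [s for s in sorted(cnt) for _ in range(cnt[s] // 2)]
--     return "".join(half) + center + "".join(reversed(half))
-- ===== Notes on version B (the rewrite author's own statement) =====
-- stated objective: simpler
-- what changed: B counts with Counter once, lists the odd-count keys up front, builds only the first half directly as count//2 copies of each sorted key, and derives the back half by reversing that half-list, eliminating A's sorted deque, the in-place remove of the center and the lockstep front/back pair-popping loop.
import Mathlib
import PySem

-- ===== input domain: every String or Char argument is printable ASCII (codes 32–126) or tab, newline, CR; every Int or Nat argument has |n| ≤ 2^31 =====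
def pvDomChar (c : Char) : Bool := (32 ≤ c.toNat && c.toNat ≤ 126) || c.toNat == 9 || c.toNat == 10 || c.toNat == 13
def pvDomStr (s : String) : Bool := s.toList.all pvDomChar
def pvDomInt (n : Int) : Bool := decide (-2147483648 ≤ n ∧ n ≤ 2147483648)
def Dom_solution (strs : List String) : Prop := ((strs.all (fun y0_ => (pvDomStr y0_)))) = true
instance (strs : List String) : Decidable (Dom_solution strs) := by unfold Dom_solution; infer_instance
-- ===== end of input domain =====

-- B builds the half directly from the counter and mirrors it by reversal instead of A's
-- lockstep front/back deque pair-popping; return values agree on all inputs (simpler decomposition).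

-- ===== PORT A =====
-- Python iterates `for i in set(arr)` in hash order; ported in PySem.Set first-insertion order —
-- the loop's result (odd-key count, the unique center, one copy removed) does not depend on that order.
def oddLoop_solution (keys : List String) (counted : PySem.Dict String Int)
    (wflag : Int) (center : String) (arr : List String) :
    Sum String (String × List String) :=
  match keys with
  | [] => Sum.inr (center, arr)
  | i :: rest =>
    if PySem.Int.mod (counted.getD i 0) 2 != 0 then
      let wflag := wflag + 1
      let center := i
      -- arr.remove(center): center was just seen in set(arr), so remove? never misses
      let arr := (PySem.List.remove? arr center).getD arr
      if wflag = 2 then Sum.inl "I'm Sorry Hansoo"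
      else oddLoop_solution rest counted wflag center arr
    else oddLoop_solution rest counted wflag center arr

-- front.append(arr.popleft()); back.appendleft(arr.popleft()) — popleft on an empty deque
-- (IndexError) is unreachable here since every remaining count is even; the fallback keeps the state.
def mainStep_solution (st : List String × List String × List String) :
    List String × List String × List String :=
  match st with
  | (front, back, x :: y :: rest) => (front ++ [x], y :: back, rest)
  | st => st

def solution (strs : List String) : String :=
  let front : List String := []
  let back : List String := []
  let arr : List String := []
  let center : String := ""
  let arr := (PySem.List.sorted strs (fun x => x) false).foldl (fun acc i => acc ++ [i]) arr
  let counted := PySem.Dict.counter arr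
  match oddLoop_solution (PySem.Set.ofList arr) counted 0 center arr with
  | Sum.inl err => err
  | Sum.inr (center, arr) =>
    let st :=
      (PySem.List.sorted (PySem.Set.ofList arr) (fun x => x) false).foldl
        (fun st i =>
          (PySem.List.pyRange 0 (PySem.Int.floordiv (counted.getD i 0) 2)).foldl
            (fun st _ => mainStep_solution st) st)
        (front, back, arr)
    PySem.Str.join "" (st.1 ++ [center] ++ st.2.1)

-- ===== PORT B =====
def solution_alt (strs : List String) : String :=
  let cnt := PySem.Dict.counter strs
  let odds := cnt.keys.filter (fun s => PySem.Int.mod (cnt.getD s 0) 2 != 0)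
  if 2 ≤ odds.length then "I'm Sorry Hansoo"
  else
    let center := odds.headD ""
    let half := (PySem.List.sorted cnt.keys (fun x => x) false).flatMap
      (fun s => (PySem.List.pyRange 0 (PySem.Int.floordiv (cnt.getD s 0) 2)).map (fun _ => s))
    PySem.Str.join "" half ++ center ++ PySem.Str.join "" half.reverse

-- ===== PRECONDITION & SPEC =====
def Spec_solution (strs : List String) (out : String) : Prop := out = solution_alt strs
instance (strs : List String) (out : String) : Decidable (Spec_solution strs out) := by unfold Spec_solution; infer_instance

-- ===== CLAIM (what is proved, stated in full; the proofs are below) =====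
def Claim_equal_solution : Prop := ∀ (strs : List String), Dom_solution strs → Spec_solution strs (solution strs)

-- ===== LEMMAS AND PROOFS =====

-- the odd-count test both programs use, on the Nat count
def pvOdd (strs : List String) (s : String) : Bool := strs.count s % 2 != 0

theorem pvOddP_eq (xs : List String) (s : String) :
    (PySem.Int.mod ((PySem.Dict.counter xs).getD s 0) 2 != 0) = pvOdd xs s := by
  rw [PySem.Dict.getD_counter]
  have h2 : (2:Int) = ((2:Nat):Int) := by norm_num
  rw [h2, PySem.Int.mod_natCast]
  simp [pvOdd, bne]
  omega

theorem oddLoop_flag1 (keys : List String) (counted : PySem.Dict String Int)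
    (center : String) (arr : List String) :
    oddLoop_solution keys counted 1 center arr =
      if keys.any (fun i => PySem.Int.mod (counted.getD i 0) 2 != 0) then Sum.inl "I'm Sorry Hansoo"
      else Sum.inr (center, arr) := by
  induction keys generalizing arr with
  | nil => simp [oddLoop_solution]
  | cons i rest ih =>
    show (if (PySem.Int.mod (counted.getD i 0) 2 != 0) = true then _ else _) = _
    by_cases hi : (PySem.Int.mod (counted.getD i 0) 2 != 0) = true
    · rw [if_pos hi, if_pos (by norm_num : (1:Int) + 1 = 2)]
      simp only [List.any_cons, hi, Bool.true_or, if_true]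
    · rw [if_neg hi, ih]
      simp only [Bool.not_eq_true] at hi
      simp only [List.any_cons, hi, Bool.false_or]

theorem oddLoop_flag0 (keys : List String) (counted : PySem.Dict String Int)
    (center : String) (arr : List String) :
    oddLoop_solution keys counted 0 center arr =
      match keys.filter (fun i => PySem.Int.mod (counted.getD i 0) 2 != 0) with
      | [] => Sum.inr (center, arr)
      | [c] => Sum.inr (c, (PySem.List.remove? arr c).getD arr)
      | _ => Sum.inl "I'm Sorry Hansoo" := by
  induction keys generalizing arr with
  | nil => simp [oddLoop_solution]
  | cons i rest ih =>
    show (if (PySem.Int.mod (counted.getD i 0) 2 != 0) = true then _ else _) = _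
    by_cases hi : (PySem.Int.mod (counted.getD i 0) 2 != 0) = true
    · rw [if_pos hi, if_neg (by norm_num : ¬ (0:Int) + 1 = 2),
        show (0:Int) + 1 = 1 from by norm_num, oddLoop_flag1]
      simp only [List.filter_cons, hi, if_true]
      rcases hrest : rest.filter (fun i => PySem.Int.mod (counted.getD i 0) 2 != 0) with _ | ⟨c, t⟩
      · have hany : rest.any (fun i => PySem.Int.mod (counted.getD i 0) 2 != 0) = false :=
          List.any_eq_false.mpr (by simpa using List.filter_eq_nil_iff.mp hrest)
        rw [hany]; rfl
      · have hc : c ∈ rest.filter (fun i => PySem.Int.mod (counted.getD i 0) 2 != 0) := by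
          rw [hrest]; exact List.mem_cons_self ..
        rw [List.mem_filter] at hc
        have hany : rest.any (fun i => PySem.Int.mod (counted.getD i 0) 2 != 0) = true := by
          rw [List.any_eq_true]; exact ⟨c, hc.1, hc.2⟩
        rw [hany]; rfl
    · rw [if_neg hi, ih]
      simp only [List.filter_cons, hi, Bool.false_eq_true, if_false]

theorem foldl_const_iterate {β : Type} (f : β → β) (l : List Int) (st : β) :
    l.foldl (fun st _ => f st) st = f^[l.length] st := by
  induction l generalizing st with
  | nil => rfl
  | cons x t ih => simp [List.foldl_cons, ih, Function.iterate_succ_apply]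

theorem iterate_mainStep (m : Nat) (k : String) (front back rest : List String) :
    mainStep_solution^[m] (front, back, List.replicate (2 * m) k ++ rest)
      = (front ++ List.replicate m k, List.replicate m k ++ back, rest) := by
  induction m generalizing front back with
  | zero => simp
  | succ n ih =>
    have h2 : 2 * (n + 1) = (2 * n) + 1 + 1 := by ring
    rw [h2, List.replicate_succ, List.replicate_succ, Function.iterate_succ_apply]
    show mainStep_solution^[n] (mainStep_solution (front, back, k :: k :: (List.replicate (2*n) k ++ rest))) = _
    rw [show mainStep_solution (front, back, k :: k :: (List.replicate (2*n) k ++ rest))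
        = (front ++ [k], k :: back, List.replicate (2*n) k ++ rest) from rfl]
    rw [ih]
    refine Prod.ext ?_ (Prod.ext ?_ rfl)
    · simp [List.replicate_succ]
    · show List.replicate n k ++ k :: back = List.replicate (n+1) k ++ back
      rw [← List.singleton_append, ← List.append_assoc, ← List.replicate_succ']

theorem drain_keys (ks : List String) (m : String → Nat) (front back rest : List String) :
    ks.foldl (fun st i => mainStep_solution^[m i] st)
        (front, back, ks.flatMap (fun k => List.replicate (2 * m k) k) ++ rest)
      = (front ++ ks.flatMap (fun k => List.replicate (m k) k),
         (ks.flatMap (fun k => List.replicate (m k) k)).reverse ++ back, rest) := by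
  induction ks generalizing front back with
  | nil => simp
  | cons k t ih =>
    simp only [List.flatMap_cons, List.foldl_cons, List.append_assoc]
    rw [iterate_mainStep, ih]
    refine Prod.ext ?_ (Prod.ext ?_ rfl) <;> simp

theorem count_flatMap_replicate (ks : List String) (hnd : ks.Nodup) (m : String → Nat) (v : String) :
    (ks.flatMap (fun k => List.replicate (m k) k)).count v = if v ∈ ks then m v else 0 := by
  induction ks with
  | nil => simp
  | cons k t ih =>
    simp only [List.flatMap_cons, List.count_append, List.count_replicate,
      List.nodup_cons] at *
    rcases hnd with ⟨hk, hnd⟩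
    rw [ih hnd]
    by_cases hv : v = k
    · subst hv; simp [hk]
    · simp [hv, Ne.symm hv, beq_iff_eq]

theorem flatMap_rep_pairwise (ks : List String) (m : String → Nat)
    (h : ks.Pairwise (· < ·)) :
    (ks.flatMap (fun k => List.replicate (m k) k)).Pairwise (· ≤ ·) := by
  rw [List.pairwise_flatMap]
  constructor
  . intro a _
    exact List.pairwise_replicate.mpr (Or.inr le_rfl)
  . refine h.imp ?_
    intro a b hab x hx y hy
    rw [List.eq_of_mem_replicate hx, List.eq_of_mem_replicate hy]
    exact le_of_lt hab

theorem sorted_decomp (L : List String) (hL : L.Pairwise (· ≤ ·)) :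
    L = (PySem.List.sorted (PySem.Set.ofList L) (fun x => x) false).flatMap
          (fun k => List.replicate (L.count k) k) := by
  set ks := PySem.List.sorted (PySem.Set.ofList L) (fun x => x) false with hks
  have hperm : ks.Perm (PySem.Set.ofList L) := PySem.List.sorted_perm ..
  have hnd : ks.Nodup := hperm.nodup_iff.mpr (PySem.Set.nodup_ofList L)
  have hmem : ∀ x, x ∈ ks ↔ x ∈ L := by
    intro x; rw [hperm.mem_iff, PySem.Set.mem_ofList]
  have hlt : ks.Pairwise (· < ·) := by
    have hle : ks.Pairwise (· ≤ ·) := PySem.List.sorted_pairwise ..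
    exact (hle.and hnd).imp (fun h => lt_of_le_of_ne h.1 h.2)
  apply PySem.List.eq_of_perm_of_pairwise_le_of_injective (fun x => x) (fun a b h => h)
  . rw [List.perm_iff_count]
    intro v
    rw [count_flatMap_replicate ks hnd]
    by_cases hv : v ∈ ks
    . simp [hv]
    . simp [hv, List.count_eq_zero.mpr (fun hmemL => hv ((hmem v).mpr hmemL))]
  . exact hL
  . exact flatMap_rep_pairwise ks _ hlt

theorem flatMap_rep_eq (ks₁ ks₂ : List String) (m : String → Nat)
    (h₁ : ks₁.Pairwise (· < ·)) (h₂ : ks₂.Pairwise (· < ·))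
    (hm : ∀ k, m k ≠ 0 → (k ∈ ks₁ ↔ k ∈ ks₂)) :
    ks₁.flatMap (fun k => List.replicate (m k) k)
      = ks₂.flatMap (fun k => List.replicate (m k) k) := by
  have hnd1 : ks₁.Nodup := h₁.imp ne_of_lt
  have hnd2 : ks₂.Nodup := h₂.imp ne_of_lt
  apply PySem.List.eq_of_perm_of_pairwise_le_of_injective (fun x => x) (fun a b h => h)
  . rw [List.perm_iff_count]
    intro v
    rw [count_flatMap_replicate ks₁ hnd1, count_flatMap_replicate ks₂ hnd2]
    by_cases hz : m v = 0
    · simp [hz]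
    · have hiff := hm v hz
      by_cases h1 : v ∈ ks₁
      · rw [if_pos h1, if_pos (hiff.mp h1)]
      · rw [if_neg h1, if_neg (fun h2 => h1 (hiff.mpr h2))]
  . exact flatMap_rep_pairwise ks₁ m h₁
  . exact flatMap_rep_pairwise ks₂ m h₂

theorem join_nil_flatten (l : List (List Char)) :
    PySem.Chars.join [] l = l.flatten := by
  induction l with
  | nil => simp [PySem.Chars.join_nil]
  | cons p t ih =>
    cases t with
    | nil => simp [PySem.Chars.join_singleton]
    | cons q r => rw [PySem.Chars.join_cons_cons, ih]; simp

theorem join_assemble (H : List String) (c : String) :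
    PySem.Str.join "" (H ++ [c] ++ H.reverse)
      = PySem.Str.join "" H ++ c ++ PySem.Str.join "" H.reverse := by
  apply String.ext
  simp only [String.toList_append, PySem.Str.toList_join]
  simp [join_nil_flatten]

theorem mem_sortedKeys (X : List String) (x : String) :
    x ∈ PySem.List.sorted (PySem.Set.ofList X) (fun x => x) false ↔ x ∈ X := by
  rw [PySem.List.mem_sorted, PySem.Set.mem_ofList]

theorem sortedKeys_lt (X : List String) :
    (PySem.List.sorted (PySem.Set.ofList X) (fun x => x) false).Pairwise (· < ·) := by
  have hperm := PySem.List.sorted_perm (PySem.Set.ofList X) (fun x : String => x) false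
  have hnd := hperm.nodup_iff.mpr (PySem.Set.nodup_ofList X)
  have hle := PySem.List.sorted_pairwise (PySem.Set.ofList X) (fun x : String => x)
  exact (hle.and hnd).imp (fun h => lt_of_le_of_ne h.1 h.2)

-- the main fold of A, given the post-oddLoop array arr₂, yields B's half and its reverse
theorem main_fold (strs arr₂ : List String)
    (hpw : arr₂.Pairwise (· ≤ ·))
    (hhalf : ∀ k, arr₂.count k = 2 * (strs.count k / 2)) :
    (PySem.List.sorted (PySem.Set.ofList arr₂) (fun x => x) false).foldl
        (fun st i =>
          (PySem.List.pyRange 0 (PySem.Int.floordiv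
              ((PySem.Dict.counter (PySem.List.sorted strs (fun x => x) false)).getD i 0) 2)).foldl
            (fun st _ => mainStep_solution st) st)
        ([], [], arr₂)
      = ((PySem.List.sorted (PySem.Set.ofList strs) (fun x => x) false).flatMap
            (fun k => List.replicate (strs.count k / 2) k),
         ((PySem.List.sorted (PySem.Set.ofList strs) (fun x => x) false).flatMap
            (fun k => List.replicate (strs.count k / 2) k)).reverse, []) := by
  have hcount : ∀ k, (PySem.List.sorted strs (fun x => x) false).count k = strs.count k :=
    fun k => (PySem.List.sorted_perm strs (fun x => x) false).count_eq k
  have hbody : ∀ (st : List String × List String × List String) i,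
      i ∈ PySem.List.sorted (PySem.Set.ofList arr₂) (fun x => x) false →
      (PySem.List.pyRange 0 (PySem.Int.floordiv
          ((PySem.Dict.counter (PySem.List.sorted strs (fun x => x) false)).getD i 0) 2)).foldl
        (fun st _ => mainStep_solution st) st
        = mainStep_solution^[strs.count i / 2] st := by
    intro st i _
    rw [PySem.Dict.getD_counter, hcount i, show (2:Int) = ((2:Nat):Int) from by norm_num,
      PySem.Int.floordiv_natCast, PySem.List.pyRange_zero_natCast, foldl_const_iterate,
      List.length_map, List.length_range]
  rw [PySem.List.foldl_congr_mem _
    (fun st i =>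
      (PySem.List.pyRange 0 (PySem.Int.floordiv
          ((PySem.Dict.counter (PySem.List.sorted strs (fun x => x) false)).getD i 0) 2)).foldl
        (fun st _ => mainStep_solution st) st)
    (fun st i => mainStep_solution^[strs.count i / 2] st) _ hbody]
  have hdec : arr₂ = (PySem.List.sorted (PySem.Set.ofList arr₂) (fun x => x) false).flatMap
      (fun k => List.replicate (2 * (strs.count k / 2)) k) := by
    conv_lhs => rw [sorted_decomp arr₂ hpw]
    congr 1
    funext k
    rw [hhalf k]
  conv_lhs => rw [show (([], [], arr₂) : List String × List String × List String)
      = ([], [], (PySem.List.sorted (PySem.Set.ofList arr₂) (fun x => x) false).flatMap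
          (fun k => List.replicate (2 * (strs.count k / 2)) k) ++ []) from by rw [← hdec]; simp]
  rw [drain_keys]
  have heq : (PySem.List.sorted (PySem.Set.ofList arr₂) (fun x => x) false).flatMap
        (fun k => List.replicate (strs.count k / 2) k)
      = (PySem.List.sorted (PySem.Set.ofList strs) (fun x => x) false).flatMap
        (fun k => List.replicate (strs.count k / 2) k) := by
    apply flatMap_rep_eq _ _ _ (sortedKeys_lt arr₂) (sortedKeys_lt strs)
    intro k hk
    rw [mem_sortedKeys, mem_sortedKeys]
    have hs : strs.count k ≥ 2 := by omega
    have ha : arr₂.count k ≥ 2 := by rw [hhalf k]; omega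
    constructor
    · intro _; exact List.count_pos_iff.mp (by omega)
    · intro _; exact List.count_pos_iff.mp (by omega)
  rw [heq]
  simp

-- ===== VERDICT (by name: the statement is the Claim_ definition above) =====
theorem solution_spec : Claim_equal_solution := by
  intro strs _
  unfold Spec_solution solution solution_alt
  simp only [PySem.List.foldl_append_singleton_eq_self, List.nil_append,
    PySem.Dict.keys_counter, oddLoop_flag0]
  have hcnt : ∀ k, (PySem.List.sorted strs (fun x => x) false).count k = strs.count k :=
    fun k => (PySem.List.sorted_perm strs (fun x => x) false).count_eq k
  have hfA : (PySem.Set.ofList (PySem.List.sorted strs (fun x => x) false)).filter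
        (fun i => PySem.Int.mod ((PySem.Dict.counter (PySem.List.sorted strs (fun x => x) false)).getD i 0) 2 != 0)
      = (PySem.Set.ofList (PySem.List.sorted strs (fun x => x) false)).filter (pvOdd strs) := by
    apply List.filter_congr
    intro i _
    rw [pvOddP_eq]
    unfold pvOdd
    rw [hcnt i]
  have hfB : (PySem.Set.ofList strs).filter
        (fun s => PySem.Int.mod ((PySem.Dict.counter strs).getD s 0) 2 != 0)
      = (PySem.Set.ofList strs).filter (pvOdd strs) := by
    apply List.filter_congr
    intro i _
    rw [pvOddP_eq]
  rw [hfA, hfB]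
  have hperm : (PySem.Set.ofList (PySem.List.sorted strs (fun x => x) false)).Perm
      (PySem.Set.ofList strs) := by
    rw [List.perm_ext_iff_of_nodup (PySem.Set.nodup_ofList _) (PySem.Set.nodup_ofList _)]
    intro a
    rw [PySem.Set.mem_ofList, PySem.Set.mem_ofList, PySem.List.mem_sorted]
  have hpf := hperm.filter (pvOdd strs)
  rcases hB : (PySem.Set.ofList strs).filter (pvOdd strs) with _ | ⟨c, _ | ⟨d, t⟩⟩
  · -- no odd-count key
    rw [hB] at hpf
    rw [hpf.eq_nil]
    dsimp only
    have hhalf : ∀ k, (PySem.List.sorted strs (fun x => x) false).count k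
        = 2 * (strs.count k / 2) := by
      intro k
      rw [hcnt k]
      by_cases hk : k ∈ strs
      · have hmem : k ∈ PySem.Set.ofList strs := (PySem.Set.mem_ofList strs k).mpr hk
        have hodd : pvOdd strs k = false := by
          by_contra h
          rw [Bool.not_eq_false] at h
          have : k ∈ (PySem.Set.ofList strs).filter (pvOdd strs) :=
            List.mem_filter.mpr ⟨hmem, h⟩
          rw [hB] at this
          exact absurd this (List.not_mem_nil)
        unfold pvOdd at hodd
        simp only [bne_eq_false_iff_eq] at hodd
        omega
      · rw [List.count_eq_zero.mpr hk]
    rw [main_fold strs _ (PySem.List.sorted_pairwise strs (fun x => x)) hhalf]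
    have hhalfB : (fun s : String => (PySem.List.pyRange 0 (PySem.Int.floordiv
          ((PySem.Dict.counter strs).getD s 0) 2)).map (fun _ => s))
        = (fun s : String => List.replicate (strs.count s / 2) s) := by
      funext s
      rw [PySem.Dict.getD_counter, show (2:Int) = ((2:Nat):Int) from by norm_num,
        PySem.Int.floordiv_natCast, PySem.List.pyRange_zero_natCast]
      simp [List.eq_replicate_iff]
    rw [hhalfB]
    simp only [List.length_nil, List.headD_nil]
    rw [if_neg (by norm_num)]
    exact join_assemble _ ""
  · -- exactly one odd-count key c
    rw [hB] at hpf
    rw [List.perm_singleton.mp hpf]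
    dsimp only
    have hcA : c ∈ PySem.List.sorted strs (fun x => x) false := by
      have : c ∈ (PySem.Set.ofList (PySem.List.sorted strs (fun x => x) false)).filter (pvOdd strs) := by
        rw [List.perm_singleton.mp hpf]; exact List.mem_cons_self ..
      exact (PySem.Set.mem_ofList _ c).mp (List.mem_filter.mp this).1
    have hoddc : pvOdd strs c = true := by
      have : c ∈ (PySem.Set.ofList strs).filter (pvOdd strs) := by
        rw [hB]; exact List.mem_cons_self ..
      exact (List.mem_filter.mp this).2
    unfold pvOdd at hoddc
    simp only [bne_iff_ne, ne_eq] at hoddc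
    rw [PySem.List.remove?_eq_some_erase _ c hcA, Option.getD_some]
    have hhalf : ∀ k, ((PySem.List.sorted strs (fun x => x) false).erase c).count k
        = 2 * (strs.count k / 2) := by
      intro k
      by_cases hkc : k = c
      · subst hkc
        rw [List.count_erase_self, hcnt k]
        omega
      · rw [List.count_erase_of_ne hkc, hcnt k]
        by_cases hk : k ∈ strs
        · have hmem : k ∈ PySem.Set.ofList strs := (PySem.Set.mem_ofList strs k).mpr hk
          have hodd : pvOdd strs k = false := by
            by_contra h
            rw [Bool.not_eq_false] at h
            have : k ∈ (PySem.Set.ofList strs).filter (pvOdd strs) :=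
              List.mem_filter.mpr ⟨hmem, h⟩
            rw [hB] at this
            exact hkc (List.mem_singleton.mp this)
          unfold pvOdd at hodd
          simp only [bne_eq_false_iff_eq] at hodd
          omega
        · rw [List.count_eq_zero.mpr hk]
    rw [main_fold strs _
      ((PySem.List.sorted_pairwise strs (fun x => x)).sublist (List.erase_sublist ..)) hhalf]
    have hhalfB : (fun s : String => (PySem.List.pyRange 0 (PySem.Int.floordiv
          ((PySem.Dict.counter strs).getD s 0) 2)).map (fun _ => s))
        = (fun s : String => List.replicate (strs.count s / 2) s) := by
      funext s
      rw [PySem.Dict.getD_counter, show (2:Int) = ((2:Nat):Int) from by norm_num,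
        PySem.Int.floordiv_natCast, PySem.List.pyRange_zero_natCast]
      simp [List.eq_replicate_iff]
    rw [hhalfB]
    simp only [List.length_singleton, List.headD_cons]
    rw [if_neg (by norm_num)]
    exact join_assemble _ c
  · -- two or more odd-count keys
    rw [hB] at hpf
    have hlen := hpf.length_eq
    rcases hA2 : (PySem.Set.ofList (PySem.List.sorted strs (fun x => x) false)).filter (pvOdd strs)
      with _ | ⟨a, _ | ⟨b, u⟩⟩
    · rw [hA2] at hlen; simp at hlen
    · rw [hA2] at hlen; simp at hlen
    · dsimp only
      rw [if_pos (by simp)]
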